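-- pv_equiv track=rewrite | github.com/MQ-AND-Digital/AND-Coding-Challenges | C1-ctrl-c-ctrl-v/main.py | findNextCommand
-- ===== SOURCE A (Python) =====
-- def findNextCommand(str):
--   lowestIndex = len(str)
--   nextCommand = ""
--
--   for command in ["[CTRL+C]", "[CTRL+X]"]:
--     if (0 <= str.find(command) < lowestIndex):
--       lowestIndex = str.find(command)
--       nextCommand = command
--
--   return nextCommand
-- ===== SOURCE B (Python) =====
-- import re
--
-- _PAT = re.compile(r"\[CTRL\+C\]|\[CTRL\+X\]")
--
-- def findNextCommand(str):
--   m = _PAT.search(str)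
--   return m.group() if m else ""
-- ===== Notes on version B (the rewrite author's own statement) =====
-- stated objective: idiomatic
-- what changed: Replaced the per-command find loop with index bookkeeping by a single leftmost-match regex search over one alternation pattern; the markers never start at the same index, so leftmost-match semantics reproduce the earliest-occurrence winner exactly.
import Mathlib
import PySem

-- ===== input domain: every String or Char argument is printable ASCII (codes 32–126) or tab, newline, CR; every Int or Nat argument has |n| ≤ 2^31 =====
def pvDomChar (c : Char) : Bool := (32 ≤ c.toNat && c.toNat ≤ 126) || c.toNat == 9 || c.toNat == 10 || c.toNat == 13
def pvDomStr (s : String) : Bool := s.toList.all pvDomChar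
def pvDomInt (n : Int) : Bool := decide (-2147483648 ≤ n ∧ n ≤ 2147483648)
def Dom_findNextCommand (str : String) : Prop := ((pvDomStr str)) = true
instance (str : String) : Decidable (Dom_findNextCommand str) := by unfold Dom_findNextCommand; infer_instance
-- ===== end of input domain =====

-- B replaces A's two-command find loop by one leftmost-match scan (Python: a single
-- re.search over the alternation "\[CTRL\+C\]|\[CTRL\+X\]"); idiomatic, same result.


-- ===== PORT A =====
-- A: for each command keep the lowest found index (len(str) as initial bound).
def findNextCommand (str : String) : String :=
  let st := (["[CTRL+C]", "[CTRL+X]"]).foldl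
    (fun (st : Int × String) command =>
      if 0 ≤ PySem.Str.find str command ∧ PySem.Str.find str command < st.1 then
        (PySem.Str.find str command, command)
      else st)
    (PySem.Str.len str, "")
  st.2

-- ===== PORT B =====
-- B (re.search of the alternation pattern): one left-to-right pass; at each position try
-- the alternatives in pattern order, return the first match, "" if the scan ends.
-- (This is exactly the leftmost-match semantics of Python's re engine for this pattern.)
def reScan : List Char → String
  | [] => ""
  | c :: rest =>
    if "[CTRL+C]".toList <+: (c :: rest) then "[CTRL+C]"
    else if "[CTRL+X]".toList <+: (c :: rest) then "[CTRL+X]"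
    else reScan rest

def findNextCommand_alt (str : String) : String := reScan str.toList

-- ===== PRECONDITION & SPEC =====
def Spec_findNextCommand (str : String) (out : String) : Prop := out = findNextCommand_alt str
instance (str : String) (out : String) : Decidable (Spec_findNextCommand str out) := by unfold Spec_findNextCommand; infer_instance

-- ===== CLAIM (what is proved, stated in full; the proofs are below) =====
def Claim_equal_findNextCommand : Prop := ∀ (str : String), Dom_findNextCommand str → Spec_findNextCommand str (findNextCommand str)

-- ===== LEMMAS AND PROOFS =====

-- If neither marker is a prefix at any position, the scan returns "".
theorem reScan_none (s : List Char)
    (h : ∀ j, ¬ "[CTRL+C]".toList <+: s.drop j ∧ ¬ "[CTRL+X]".toList <+: s.drop j) :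
    reScan s = "" := by
  induction s with
  | nil => rfl
  | cons c rest ih =>
    have h0 := h 0
    simp only [List.drop_zero] at h0
    rw [reScan, if_neg h0.1, if_neg h0.2]
    exact ih (fun j => h (j + 1))

-- If some marker first occurs (as a prefix) at position k, the scan returns the
-- alternative matched there, C before X.
theorem reScan_found (s : List Char) (k : Nat)
    (hk : "[CTRL+C]".toList <+: s.drop k ∨ "[CTRL+X]".toList <+: s.drop k)
    (hmin : ∀ j < k, ¬ "[CTRL+C]".toList <+: s.drop j ∧ ¬ "[CTRL+X]".toList <+: s.drop j) :
    reScan s = if "[CTRL+C]".toList <+: s.drop k then "[CTRL+C]" else "[CTRL+X]" := by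
  induction s generalizing k with
  | nil =>
    exfalso
    rcases hk with h | h <;> simp_all [List.prefix_iff_eq_take]
  | cons c rest ih =>
    cases k with
    | zero =>
      simp only [List.drop_zero] at hk ⊢
      rw [reScan]
      by_cases hC : "[CTRL+C]".toList <+: (c :: rest)
      · rw [if_pos hC, if_pos hC]
      · rcases hk with h | h
        · exact absurd h hC
        · rw [if_neg hC, if_pos h, if_neg hC]
    | succ k' =>
      have h0 := hmin 0 (Nat.succ_pos _)
      simp only [List.drop_zero] at h0
      rw [reScan, if_neg h0.1, if_neg h0.2]
      have : ∀ j < k', ¬ "[CTRL+C]".toList <+: rest.drop j ∧ ¬ "[CTRL+X]".toList <+: rest.drop j := by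
        intro j hj
        have := hmin (j + 1) (by omega)
        simpa using this
      simpa using ih k' (by simpa using hk) this

-- If sub is a prefix of s.drop k with sub ≠ [], then k < s.length.
theorem pos_lt_length {sub s : List Char} {k : Nat} (hne : sub ≠ [])
    (h : sub <+: s.drop k) : k < s.length := by
  have hlen := h.length_le
  have : 0 < sub.length := List.length_pos_iff.mpr hne
  have := List.length_drop (l := s) (i := k) ▸ hlen
  omega

-- ===== VERDICT (by name: the statement is the Claim_ definition above) =====
theorem findNextCommand_spec : Claim_equal_findNextCommand := by
  intro str _
  unfold Spec_findNextCommand findNextCommand findNextCommand_alt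
  simp only [List.foldl]
  set s := str.toList with hs
  set fC := PySem.Str.find str "[CTRL+C]" with hfC
  set fX := PySem.Str.find str "[CTRL+X]" with hfX
  have hCeq : fC = PySem.Chars.find s "[CTRL+C]".toList := by
    rw [hfC, hs]; simp [PySem.Str.find_eq]
  have hXeq : fX = PySem.Chars.find s "[CTRL+X]".toList := by
    rw [hfX, hs]; simp [PySem.Str.find_eq]
  have hlen : PySem.Str.len str = (s.length : Int) := by
    rw [hs]; simp [PySem.Str.len_eq]
  rw [hlen]
  clear_value fC fX s
  -- absence of a marker means: no prefix at any position
  have noOcc : ∀ (sub : List Char), PySem.Chars.find s sub < 0 → ∀ j, ¬ sub <+: s.drop j := by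
    intro sub hneg j hpre
    have h1 : PySem.Chars.find s sub = -1 := by
      have := PySem.Chars.neg_one_le_find (s := s) (sub := sub)
      omega
    have h2 : ¬ sub <:+: s := (PySem.Chars.find_eq_neg_one_iff (s := s) (sub := sub)).mp h1
    have h3 : PySem.Chars.isIn sub s = true :=
      (PySem.Chars.exists_prefix_drop_iff_isIn (sub := sub) (s := s)).mp ⟨j, hpre⟩
    exact h2 ((PySem.Chars.isIn_iff_infix (sub := sub) (s := s)).mp h3)
  have hCne : "[CTRL+C]".toList ≠ ([] : List Char) := by decide
  have hXne : "[CTRL+X]".toList ≠ ([] : List Char) := by decide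
  -- find_spec packaged
  have Cspec := fun (h : 0 ≤ fC) => by
    have h' := PySem.Chars.find_spec (s := s) (sub := "[CTRL+C]".toList) (hCeq ▸ h)
    rw [← hCeq] at h'; exact h'
  have Xspec := fun (h : 0 ≤ fX) => by
    have h' := PySem.Chars.find_spec (s := s) (sub := "[CTRL+X]".toList) (hXeq ▸ h)
    rw [← hXeq] at h'; exact h'
  split_ifs with h1 h2 h2
  · -- X wins: fX < fC
    have hX0 : 0 ≤ fX := h2.1
    have hXC : fX < fC := h2.2
    have hC0 : 0 ≤ fC := h1.1
    obtain ⟨hCpre, hCmin⟩ := Cspec hC0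
    obtain ⟨hXpre, hXmin⟩ := Xspec hX0
    rw [show ((fX, "[CTRL+X]") : Int × String).2 = "[CTRL+X]" from rfl,
        reScan_found s fX.toNat (Or.inr hXpre)
          (fun j hj => ⟨hCmin j (by omega), hXmin j hj⟩),
        if_neg (fun hpre => absurd hpre (hCmin fX.toNat (by omega)))]
  · -- C wins: C occurs and fX is absent or not smaller
    have hC0 : 0 ≤ fC := h1.1
    obtain ⟨hCpre, hCmin⟩ := Cspec hC0
    rw [show ((fC, "[CTRL+C]") : Int × String).2 = "[CTRL+C]" from rfl,
        reScan_found s fC.toNat (Or.inl hCpre) ?_, if_pos hCpre]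
    intro j hj
    refine ⟨hCmin j hj, ?_⟩
    rcases (by omega : 0 ≤ fX ∨ fX < 0) with hX0 | hX0
    · have hCX : fC ≤ fX := by
        by_contra hlt
        exact h2 ⟨hX0, by omega⟩
      exact (Xspec hX0).2 j (by omega)
    · exact noOcc _ (hXeq ▸ hX0) j
  · -- only X occurs
    have hX0 : 0 ≤ fX := h2.1
    obtain ⟨hXpre, hXmin⟩ := Xspec hX0
    have hCneg : fC < 0 := by
      rcases (by omega : 0 ≤ fC ∨ fC < 0) with hC0 | hC0
      · exact absurd ⟨hC0, by have := pos_lt_length hCne (Cspec hC0).1; omega⟩ h1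
      · exact hC0
    rw [show ((fX, "[CTRL+X]") : Int × String).2 = "[CTRL+X]" from rfl,
        reScan_found s fX.toNat (Or.inr hXpre)
          (fun j hj => ⟨noOcc _ (hCeq ▸ hCneg) j, hXmin j hj⟩),
        if_neg (fun hpre => noOcc _ (hCeq ▸ hCneg) fX.toNat hpre)]
  · -- neither occurs
    have hCneg : fC < 0 := by
      rcases (by omega : 0 ≤ fC ∨ fC < 0) with hC0 | hC0
      · exact absurd ⟨hC0, by have := pos_lt_length hCne (Cspec hC0).1; omega⟩ h1
      · exact hC0
    have hXneg : fX < 0 := by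
      rcases (by omega : 0 ≤ fX ∨ fX < 0) with hX0 | hX0
      · exact absurd ⟨hX0, by have := pos_lt_length hXne (Xspec hX0).1; omega⟩ h2
      · exact hX0
    exact (reScan_none s (fun j => ⟨noOcc _ (hCeq ▸ hCneg) j, noOcc _ (hXeq ▸ hXneg) j⟩)).symm
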